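-- pv_equiv track=rewrite | github.com/helloAlgorithms/helloAlgorithms | programmers/jihwjeon/138476.py | solution
-- ===== SOURCE A (Python) =====
-- def solution(k, tangerine):
--     answer = 0
--     d = {}
--
--     for t in tangerine:
--         if t not in d:
--             d[t] = 1
--         else:
--             d[t] += 1
--
--     d = sorted(d.items(), key=lambda item: item[1], reverse=True)
--
--     tmp = 0
--     for v, cnt in d:
--         tmp += cnt
--         answer += 1
--         if tmp >= k:
--             break
--     return answer
-- ===== SOURCE B (Python) =====
-- def solution(k, tangerine):
--     # Counting-sort over frequencies: bucket counts per frequency value,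
--     # then walk frequencies from the maximum down instead of sorting.
--     freq = {}
--     for t in tangerine:
--         freq[t] = freq.get(t, 0) + 1
--     bucket = {}
--     mx = 0
--     for c in freq.values():
--         bucket[c] = bucket.get(c, 0) + 1
--         if c > mx:
--             mx = c
--     answer = 0
--     tmp = 0
--     c = mx
--     while c >= 1:
--         for _ in range(bucket.get(c, 0)):
--             tmp += c
--             answer += 1
--             if tmp >= k:
--                 return answer
--         c -= 1
--     return answer
-- ===== Notes on version B (the rewrite author's own statement) =====
-- stated objective: alternative
-- what changed: Replaces the comparison sort of (size,count) items by a counting-sort over frequency values: a bucket table maps each count to how many sizes have it, and a downward walk from the maximum count accumulates fruit until k is reached.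
import Mathlib
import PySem

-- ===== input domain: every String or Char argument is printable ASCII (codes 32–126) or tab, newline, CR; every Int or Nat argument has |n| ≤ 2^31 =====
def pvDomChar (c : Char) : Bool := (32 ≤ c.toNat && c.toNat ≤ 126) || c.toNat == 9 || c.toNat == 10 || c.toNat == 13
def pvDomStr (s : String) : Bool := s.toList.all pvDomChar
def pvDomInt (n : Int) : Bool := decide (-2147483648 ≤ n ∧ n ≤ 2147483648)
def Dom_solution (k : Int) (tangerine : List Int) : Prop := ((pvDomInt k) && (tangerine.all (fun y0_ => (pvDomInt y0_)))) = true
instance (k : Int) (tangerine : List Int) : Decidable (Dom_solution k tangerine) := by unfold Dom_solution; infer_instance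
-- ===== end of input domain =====

-- B replaces A's comparison sort of the size→count items by a counting sort over the
-- frequency values (bucket table walked from the maximum count downwards); objective: alternative.

-- ===== PORT A =====
-- the 'for v, cnt in d: tmp += cnt; answer += 1; if tmp >= k: break' loop
def solveLoopA (k : Int) : List (Int × Int) → Int → Int → Int
  | [], _, answer => answer
  | (_, cnt) :: rest, tmp, answer =>
    let tmp := tmp + cnt
    let answer := answer + 1
    if tmp ≥ k then answer else solveLoopA k rest tmp answer

def solution (k : Int) (tangerine : List Int) : Int :=
  let d : PySem.Dict Int Int := tangerine.foldl
    (fun d t => if d.contains t = false then d.insert t 1 else d.modify t 0 (· + 1))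
    PySem.Dict.empty
  let ds := PySem.List.sorted d.items (fun item => item.2) true
  solveLoopA k ds 0 0

-- ===== PORT B =====
-- the body of 'for _ in range(bucket.get(c, 0)): …' with its early return
def innerB (k c : Int) : Nat → Int → Int → Sum Int (Int × Int)
  | 0, tmp, answer => .inr (tmp, answer)
  | n + 1, tmp, answer =>
    let tmp := tmp + c
    let answer := answer + 1
    if tmp ≥ k then .inl answer else innerB k c n tmp answer

-- the 'while c >= 1' loop
def whileB (bucket : PySem.Dict Int Int) (k : Int) (c tmp answer : Int) : Int :=
  if h : 1 ≤ c then
    match innerB k c (bucket.getD c 0).toNat tmp answer with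
    | .inl a => a
    | .inr (tmp', ans') => whileB bucket k (c - 1) tmp' ans'
  else answer
termination_by c.toNat
decreasing_by omega

def solution_alt (k : Int) (tangerine : List Int) : Int :=
  let freq : PySem.Dict Int Int := tangerine.foldl
    (fun d t => d.insert t (d.getD t 0 + 1)) PySem.Dict.empty
  let p := freq.values.foldl
    (fun (p : PySem.Dict Int Int × Int) c =>
      (p.1.insert c (p.1.getD c 0 + 1), if c > p.2 then c else p.2))
    (PySem.Dict.empty, 0)
  whileB p.1 k p.2 0 0

-- ===== PRECONDITION & SPEC =====
def Spec_solution (k : Int) (tangerine : List Int) (out : Int) : Prop := out = solution_alt k tangerine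
instance (k : Int) (tangerine : List Int) (out : Int) : Decidable (Spec_solution k tangerine out) := by unfold Spec_solution; infer_instance

-- ===== CLAIM (what is proved, stated in full; the proofs are below) =====
def Claim_equal_solution : Prop := ∀ (k : Int) (tangerine : List Int), Dom_solution k tangerine → Spec_solution k tangerine (solution k tangerine)

-- ===== LEMMAS AND PROOFS =====

-- scan over the multiset of counts only (both loops reduce to this)
def scanC (k : Int) : List Int → Int → Int → Int
  | [], _, answer => answer
  | c :: rest, tmp, answer =>
    if tmp + c ≥ k then answer + 1 else scanC k rest (tmp + c) (answer + 1)

theorem solveLoopA_eq_scanC (k : Int) (l : List (Int × Int)) (tmp answer : Int) :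
    solveLoopA k l tmp answer = scanC k (l.map Prod.snd) tmp answer := by
  induction l generalizing tmp answer with
  | nil => rfl
  | cons p rest ih => cases p; simp [solveLoopA, scanC]; split <;> simp [ih]

theorem scanC_replicate_append (k c : Int) (n : Nat) (rest : List Int) (tmp answer : Int) :
    scanC k (List.replicate n c ++ rest) tmp answer =
      (match innerB k c n tmp answer with
       | .inl a => a
       | .inr (tmp', ans') => scanC k rest tmp' ans') := by
  induction n generalizing tmp answer with
  | zero => rfl
  | succ m ih =>
    simp only [List.replicate_succ, List.cons_append, scanC, innerB]
    split <;> simp_all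

-- the list of counts B's while loop walks: c repeated bucket[c] times, c = cinit down to 1
def descList (bucket : PySem.Dict Int Int) (c : Int) : List Int :=
  if 1 ≤ c then List.replicate (bucket.getD c 0).toNat c ++ descList bucket (c - 1) else []
termination_by c.toNat
decreasing_by omega

theorem whileB_eq_scanC (bucket : PySem.Dict Int Int) (k c tmp answer : Int) :
    whileB bucket k c tmp answer = scanC k (descList bucket c) tmp answer := by
  generalize hn : c.toNat = n
  induction n generalizing c tmp answer with
  | zero =>
    rw [whileB, descList]
    have : ¬ (1 ≤ c) := by omega
    simp [this, scanC]
  | succ m ih =>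
    rw [whileB, descList]
    have h1 : (1 ≤ c) := by omega
    simp only [h1, dif_pos, if_pos]
    rw [scanC_replicate_append]
    cases hi : innerB k c (bucket.getD c 0).toNat tmp answer with
    | inl a => rfl
    | inr p => cases p; exact ih _ _ _ (by omega)

theorem mem_descList (bucket : PySem.Dict Int Int) (c x : Int) (hx : x ∈ descList bucket c) :
    1 ≤ x ∧ x ≤ c := by
  generalize hn : c.toNat = n
  induction n generalizing c with
  | zero =>
    rw [descList] at hx
    have : ¬ (1 ≤ c) := by omega
    simp [this] at hx
  | succ m ih =>
    rw [descList] at hx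
    have h1 : (1 ≤ c) := by omega
    simp only [h1, if_pos, List.mem_append, List.mem_replicate] at hx
    rcases hx with ⟨-, rfl⟩ | hx
    · omega
    · have := ih (c - 1) hx (by omega); omega

theorem count_descList (vals : List Int) (c v : Int) :
    (descList (PySem.Dict.counter vals) c).count v =
      if 1 ≤ v ∧ v ≤ c then vals.count v else 0 := by
  generalize hn : c.toNat = n
  induction n generalizing c with
  | zero =>
    rw [descList, if_neg (by omega : ¬ (1 ≤ c)), if_neg (by omega)]
    rfl
  | succ m ih =>
    rw [descList]
    have h1 : (1 ≤ c) := by omega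
    rw [if_pos h1, List.count_append, List.count_replicate,
        PySem.Dict.getD_counter, ih (c - 1) (by omega)]
    simp only [beq_iff_eq, Int.toNat_natCast]
    by_cases hvc : c = v
    · subst hvc
      rw [if_pos rfl, if_neg (by omega), if_pos (by omega)]
      simp
    · rw [if_neg hvc]
      by_cases hr : 1 ≤ v ∧ v ≤ c - 1
      · rw [if_pos hr, if_pos (by omega)]
        omega
      · rw [if_neg hr, if_neg (by omega)]

theorem pairwise_descList (b : PySem.Dict Int Int) (c : Int) :
    (descList b c).Pairwise (fun a x => x ≤ a) := by
  generalize hn : c.toNat = n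
  induction n generalizing c with
  | zero =>
    rw [descList, if_neg (by omega : ¬ (1 ≤ c))]
    exact List.Pairwise.nil
  | succ m ih =>
    rw [descList]
    have h1 : (1 ≤ c) := by omega
    rw [if_pos h1, List.pairwise_append]
    refine ⟨List.pairwise_replicate.mpr (by omega), ih (c - 1) (by omega), ?_⟩
    intro x hx y hy
    have h2 := mem_descList b (c - 1) y hy
    have h3 : x = c := List.eq_of_mem_replicate hx
    omega

theorem counter_values_pos (xs : List Int) (w : Int)
    (hw : w ∈ (PySem.Dict.counter xs).values) : 1 ≤ w := by
  have : (PySem.Dict.counter xs).values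
      = ((PySem.Dict.counter xs).items).map (fun p => p.2) := rfl
  rw [this, PySem.Dict.items_counter, List.map_map, List.mem_map] at hw
  obtain ⟨a, ha, rfl⟩ := hw
  rw [PySem.Set.mem_ofList] at ha
  have := List.count_pos_iff.mpr ha
  simp only [Function.comp]
  omega

-- the central identity: B's bucket walk visits exactly the counts of A's reverse-sorted items
theorem descList_eq (tangerine : List Int) :
    descList (PySem.Dict.counter ((PySem.Dict.counter tangerine).values))
        (((PySem.Dict.counter tangerine).values).foldl max 0)
      = (PySem.List.sorted (PySem.Dict.counter tangerine).items (fun item => item.2) true).map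
          (fun item => item.2) := by
  set vals := (PySem.Dict.counter tangerine).values with hvals
  set M := vals.foldl max 0 with hM
  set S := PySem.List.sorted (PySem.Dict.counter tangerine).items (fun item => item.2) true with hS
  have hub : ∀ x ∈ vals, x ≤ M := (PySem.List.le_foldl_max vals 0).2
  have hlb : ∀ x ∈ vals, 1 ≤ x := fun x hx => counter_values_pos tangerine x hx
  have perm2 : (descList (PySem.Dict.counter vals) M).Perm vals := by
    rw [List.perm_iff_count]
    intro v
    rw [count_descList]
    by_cases h : 1 ≤ v ∧ v ≤ M
    · rw [if_pos h]
    · rw [if_neg h]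
      symm
      rw [List.count_eq_zero]
      intro hv
      exact h ⟨hlb v hv, hub v hv⟩
  have perm1 : (S.map (fun item => item.2)).Perm vals := by
    have := (PySem.List.sorted_perm (PySem.Dict.counter tangerine).items
      (fun item => item.2) true).map (fun item => item.2)
    exact this
  have pw2 : (descList (PySem.Dict.counter vals) M).Pairwise (fun a b => b ≤ a) :=
    pairwise_descList _ _
  have pw1 : (S.map (fun item => item.2)).Pairwise (fun a b => b ≤ a) :=
    List.pairwise_map.mpr (PySem.List.sorted_pairwise_rev _ _)
  exact PySem.List.eq_of_perm_of_pairwise_le_of_injective (fun x : Int => -x)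
    neg_injective (perm2.trans perm1.symm)
    (pw2.imp (fun h => by simpa using neg_le_neg h)) (pw1.imp (fun h => by simpa using neg_le_neg h))

-- ===== VERDICT (by name: the statement is the Claim_ definition above) =====
theorem solution_spec : Claim_equal_solution := by
  intro k tangerine _
  have hd : tangerine.foldl
      (fun d t => if d.contains t = false then d.insert t 1 else d.modify t 0 (· + 1))
      PySem.Dict.empty = PySem.Dict.counter tangerine := by
    rw [PySem.List.foldl_congr_mem tangerine _
        (fun d t => d.insert t (d.getD t 0 + 1)) PySem.Dict.empty ?_,
        PySem.Dict.foldl_insert_getD_add_one_eq_counter]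
    intro d t _
    by_cases h : d.contains t = true
    · simp only [h]
      rfl
    · have h' : d.contains t = false := by simpa using h
      rw [if_pos h']
      show d.insert t 1 = d.insert t (d.getD t 0 + 1)
      rw [PySem.Dict.getD_of_not_contains d 0 h']
      norm_num
  have e1 : solution k tangerine
      = solveLoopA k (PySem.List.sorted
          (tangerine.foldl
            (fun d t => if d.contains t = false then d.insert t 1 else d.modify t 0 (· + 1))
            PySem.Dict.empty).items (fun item => item.2) true) 0 0 := rfl
  have e2 : solution_alt k tangerine
      = (let P := ((tangerine.foldl (fun d t => d.insert t (d.getD t 0 + 1))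
            PySem.Dict.empty).values).foldl
            (fun (p : PySem.Dict Int Int × Int) c =>
              (p.1.insert c (p.1.getD c 0 + 1), if c > p.2 then c else p.2))
            (PySem.Dict.empty, 0)
         whileB P.1 k P.2 0 0) := rfl
  show solution k tangerine = solution_alt k tangerine
  rw [e1, e2, hd]
  simp only [PySem.Dict.foldl_insert_getD_add_one_eq_counter,
    PySem.List.foldl_prod_mk (f := fun (d : PySem.Dict Int Int) c => d.insert c (d.getD c 0 + 1))
      (g := fun m c => if c > m then c else m)]
  have hmax : ((PySem.Dict.counter tangerine).values).foldl
      (fun m c => if c > m then c else m) 0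
      = ((PySem.Dict.counter tangerine).values).foldl max 0 := by
    apply PySem.List.foldl_congr_mem
    intro m c _
    rcases lt_or_ge m c with h | h
    · rw [if_pos h]
      exact (max_eq_right h.le).symm
    · rw [if_neg (by omega)]
      exact (max_eq_left h).symm
  rw [hmax, solveLoopA_eq_scanC, whileB_eq_scanC, descList_eq]
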